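-- pv_equiv track=rewrite | github.com/krushchavan/lkml-reviews | llm_summarizer.py | _split_body_into_segments
-- ===== SOURCE A (Python) =====
-- from typing import Dict, List, Optional, Tuple
--
-- def _split_body_into_segments(body: str) -> List[str]:
--     """Split a message body into author-only text segments.
--
--     An inline review email typically interleaves the author's own comments
--     with quoted text from the previous message (lines starting with ">").
--     This function strips all quoted lines and returns the remaining runs of
--     the author's own text as separate segments — one segment per contiguous
--     block of non-quoted lines.
--
--     Example input::
--
--         > void foo() {
--         > }
--         I think we should rename this to bar().
--
--         > int x = compute();
--         This variable is never used — should be removed.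
--
--     Returns::
--
--         ["I think we should rename this to bar().",
--          "This variable is never used — should be removed."]
--
--     A single segment is returned when there are no embedded quotes.
--     Empty segments (whitespace only) are discarded.
--     """
--     segments: List[str] = []
--     current: List[str] = []
--
--     for line in body.split("\n"):
--         if line.strip().startswith(">"):
--             # Quoted line — flush the current author segment if non-empty
--             if any(l.strip() for l in current):
--                 segments.append("\n".join(current).strip())
--             current = []
--         else:
--             current.append(line)
--
--     # Flush final segment
--     if any(l.strip() for l in current):
--         segments.append("\n".join(current).strip())
--
--     # If nothing survived (e.g. all-quoted message), return the original body
--     # stripped of quote lines so the LLM still gets something useful.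
--     if not segments:
--         plain = "\n".join(
--             l for l in body.split("\n") if not l.strip().startswith(">")
--         ).strip()
--         if plain:
--             segments = [plain]
--
--     return segments
-- ===== SOURCE B (Python) =====
-- from typing import List
--
--
-- def _split_body_into_segments(body: str) -> List[str]:
--     """Span-based segmentation: skip runs of quoted lines, take runs of
--     non-quoted lines wholesale (two-pointer), instead of an accumulator
--     that is flushed on each quoted line."""
--     lines = body.split("\n")
--     n = len(lines)
--     segments: List[str] = []
--     i = 0
--     while i < n:
--         if lines[i].strip().startswith(">"):
--             i += 1
--             continue
--         j = i
--         while j < n and not lines[j].strip().startswith(">"):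
--             j += 1
--         run = lines[i:j]
--         if any(l.strip() for l in run):
--             segments.append("\n".join(run).strip())
--         i = j
--
--     if not segments:
--         plain = "\n".join(
--             l for l in lines if not l.strip().startswith(">")
--         ).strip()
--         if plain:
--             segments = [plain]
--
--     return segments
-- ===== Notes on version B (the rewrite author's own statement) =====
-- stated objective: alternative
-- what changed: Replaced A's accumulate-and-flush loop (a `current` buffer flushed at each quoted line and once more after the loop) with a two-pointer span scan that skips runs of quoted lines and slices each contiguous non-quoted run out wholesale; the fallback for all-quoted bodies is kept verbatim.
import Mathlib
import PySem

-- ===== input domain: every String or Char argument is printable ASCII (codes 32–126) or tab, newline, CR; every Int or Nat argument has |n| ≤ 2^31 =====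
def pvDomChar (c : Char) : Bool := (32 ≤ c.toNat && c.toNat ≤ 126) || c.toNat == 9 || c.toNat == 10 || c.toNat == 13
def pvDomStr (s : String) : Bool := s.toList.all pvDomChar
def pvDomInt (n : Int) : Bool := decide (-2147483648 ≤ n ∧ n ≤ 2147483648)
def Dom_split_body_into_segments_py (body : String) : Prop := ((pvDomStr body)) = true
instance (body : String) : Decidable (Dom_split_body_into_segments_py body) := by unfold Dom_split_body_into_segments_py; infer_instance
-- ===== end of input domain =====

-- B replaces A's accumulate-and-flush pass with a two-pointer span scan over the
-- same line list (skip quoted runs, take each non-quoted run wholesale); objective: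
-- alternative decomposition, same cost.

-- shared trivial line predicates / flush expression (used verbatim by both Pythons)
def pvLines (body : String) : List String := (PySem.Str.split? body "\n").getD []

def pvQuoted (l : String) : Bool := PySem.Str.startswith (PySem.Str.strip l) ">"
def pvNonws (l : String) : Bool := PySem.Str.strip l != ""
def pvFlush (run : List String) : String := PySem.Str.strip (PySem.Str.join "\n" run)

-- ===== PORT A =====
def pvStepA (st : List String × List String) (line : String) : List String × List String :=
  if pvQuoted line then
    (if st.2.any pvNonws then st.1 ++ [pvFlush st.2] else st.1, [])
  else
    (st.1, st.2 ++ [line])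

def split_body_into_segments_py (body : String) : List String :=
  let lines := pvLines body
  let st := lines.foldl pvStepA ([], [])
  let segments := if st.2.any pvNonws then st.1 ++ [pvFlush st.2] else st.1
  if segments = [] then
    let plain := pvFlush (lines.filter (fun l => !pvQuoted l))
    if plain != "" then [plain] else []
  else segments

-- ===== PORT B =====
-- the two-pointer while loop of Source B as structural recursion on the line list
def pvAltSegs : List String → List String
  | [] => []
  | l :: rest =>
    if pvQuoted l then
      pvAltSegs rest
    else
      let run := l :: rest.takeWhile (fun x => !pvQuoted x)
      let rest' := rest.dropWhile (fun x => !pvQuoted x)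
      (if run.any pvNonws then [pvFlush run] else []) ++ pvAltSegs rest'
termination_by ls => ls.length
decreasing_by
  all_goals simp
  have := List.length_dropWhile_le (fun x => !pvQuoted x) rest
  omega

def split_body_into_segments_py_alt (body : String) : List String :=
  let lines := pvLines body
  let segments := pvAltSegs lines
  if segments = [] then
    let plain := pvFlush (lines.filter (fun l => !pvQuoted l))
    if plain != "" then [plain] else []
  else segments

-- ===== PRECONDITION & SPEC =====
def Spec_split_body_into_segments_py (body : String) (out : List String) : Prop := out = split_body_into_segments_py_alt body
instance (body : String) (out : List String) : Decidable (Spec_split_body_into_segments_py body out) := by unfold Spec_split_body_into_segments_py; infer_instance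

-- ===== CLAIM (what is proved, stated in full; the proofs are below) =====
def Claim_equal_split_body_into_segments_py : Prop := ∀ (body : String), Dom_split_body_into_segments_py body → Spec_split_body_into_segments_py body (split_body_into_segments_py body)

-- ===== LEMMAS AND PROOFS =====

/-- A's "flush the current segment" value. -/
def pvEmit (cur : List String) : List String :=
  if cur.any pvNonws then [pvFlush cur] else []

/-- A's finalisation of the loop state. -/
def pvFin (st : List String × List String) : List String :=
  if st.2.any pvNonws then st.1 ++ [pvFlush st.2] else st.1

lemma pvFin_eq (st : List String × List String) : pvFin st = st.1 ++ pvEmit st.2 := by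
  unfold pvFin pvEmit; split <;> simp

lemma pvFin_prefix (lines : List String) :
    ∀ segs cur, pvFin (lines.foldl pvStepA (segs, cur)) =
      segs ++ pvFin (lines.foldl pvStepA ([], cur)) := by
  induction lines with
  | nil => intro segs cur; simp [pvFin_eq]
  | cons l ls ih =>
    intro segs cur
    simp only [List.foldl_cons, pvStepA]
    by_cases h : pvQuoted l = true <;> simp only [h, if_true, Bool.false_eq_true, if_false]
    · by_cases h2 : cur.any pvNonws = true <;>
        simp only [h2, if_true, Bool.false_eq_true, if_false, List.nil_append]
      · rw [ih (segs ++ [pvFlush cur]), ih [pvFlush cur]]; simp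
      · exact ih segs []
    · exact ih segs (cur ++ [l])

lemma pvAltSegs_split (ls : List String) :
    pvAltSegs ls =
      pvEmit (ls.takeWhile (fun x => !pvQuoted x)) ++
        pvAltSegs (ls.dropWhile (fun x => !pvQuoted x)) := by
  cases ls with
  | nil => simp [pvAltSegs, pvEmit]
  | cons m ms =>
    by_cases h : pvQuoted m = true
    · simp [pvAltSegs, h, pvEmit]
    · simp [pvAltSegs, h, pvEmit]

lemma pvFin_foldl (lines : List String) :
    ∀ cur, pvFin (lines.foldl pvStepA ([], cur)) =
      pvEmit (cur ++ lines.takeWhile (fun x => !pvQuoted x)) ++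
        pvAltSegs (lines.dropWhile (fun x => !pvQuoted x)) := by
  induction lines with
  | nil => intro cur; simp [pvFin_eq, pvAltSegs]
  | cons l ls ih =>
    intro cur
    simp only [List.foldl_cons, pvStepA]
    by_cases h : pvQuoted l = true <;> simp only [h, if_true, Bool.false_eq_true, if_false]
    · have hrest : pvFin (ls.foldl pvStepA
          ((if cur.any pvNonws then [] ++ [pvFlush cur] else []), [])) =
          pvEmit cur ++ pvAltSegs ls := by
        by_cases h2 : cur.any pvNonws = true <;>
          simp only [h2, if_true, Bool.false_eq_true, if_false, List.nil_append]
        · rw [pvFin_prefix, ih []]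
          simp only [List.nil_append]
          rw [← pvAltSegs_split ls]; simp [pvEmit, h2]
        · rw [ih []]
          simp only [List.nil_append]
          rw [← pvAltSegs_split ls]; simp [pvEmit, h2]
      rw [hrest]
      simp only [List.takeWhile_cons, List.dropWhile_cons, h, Bool.not_true,
        Bool.false_eq_true, if_false]
      simp [pvAltSegs, h]
    · rw [ih (cur ++ [l])]
      simp [h, List.append_assoc]

lemma pvSegs_eq (lines : List String) :
    pvFin (lines.foldl pvStepA ([], [])) = pvAltSegs lines := by
  rw [pvFin_foldl lines []]
  simp only [List.nil_append]
  exact (pvAltSegs_split lines).symm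

-- ===== VERDICT (by name: the statement is the Claim_ definition above) =====
theorem split_body_into_segments_py_spec : Claim_equal_split_body_into_segments_py := by
  intro body _
  unfold Spec_split_body_into_segments_py split_body_into_segments_py split_body_into_segments_py_alt
  have h := pvSegs_eq (pvLines body)
  unfold pvFin at h
  simp only [← h]
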